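-- pv_equiv track=rewrite | github.com/SpicyIcy00/supabotv38 | supabot/ui/components/charts.py | _get_best_value_column
-- ===== SOURCE A (Python) =====
-- from typing import Optional, List, Tuple
--
-- def _get_best_value_column(numeric_cols: List[str]) -> Optional[str]:
--     """Select the best numeric column for values."""
--     if not numeric_cols:
--         return None
--
--     # Prioritize common value columns
--     priority_patterns = ['total', 'amount', 'revenue', 'sales', 'value', 'sum', 'count', 'quantity']
--
--     for pattern in priority_patterns:
--         for col in numeric_cols:
--             if pattern.lower() in col.lower():
--                 return col
--
--     return numeric_cols[0]  # Default to first numeric column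
-- ===== SOURCE B (Python) =====
-- from typing import Optional, List
--
-- def _get_best_value_column(numeric_cols: List[str]) -> Optional[str]:
--     """Select the best numeric column for values (one pass, rank argmin)."""
--     if not numeric_cols:
--         return None
--
--     priority_patterns = ['total', 'amount', 'revenue', 'sales', 'value', 'sum', 'count', 'quantity']
--
--     best_col = None
--     best_rank = len(priority_patterns)
--     for col in numeric_cols:
--         low = col.lower()
--         rank = len(priority_patterns)
--         for i, pattern in enumerate(priority_patterns):
--             if pattern in low:
--                 rank = i
--                 break
--         if rank < best_rank:
--             best_col = col
--             best_rank = rank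
--
--     return best_col if best_col is not None else numeric_cols[0]
-- ===== Notes on version B (the rewrite author's own statement) =====
-- stated objective: alternative
-- what changed: A scans patterns in the outer loop and columns in the inner loop with an early return; B makes a single pass over the columns, computing each column's first-matching-pattern rank and keeping the strictly-best (argmin) column, with no early return over patterns.
import Mathlib
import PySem

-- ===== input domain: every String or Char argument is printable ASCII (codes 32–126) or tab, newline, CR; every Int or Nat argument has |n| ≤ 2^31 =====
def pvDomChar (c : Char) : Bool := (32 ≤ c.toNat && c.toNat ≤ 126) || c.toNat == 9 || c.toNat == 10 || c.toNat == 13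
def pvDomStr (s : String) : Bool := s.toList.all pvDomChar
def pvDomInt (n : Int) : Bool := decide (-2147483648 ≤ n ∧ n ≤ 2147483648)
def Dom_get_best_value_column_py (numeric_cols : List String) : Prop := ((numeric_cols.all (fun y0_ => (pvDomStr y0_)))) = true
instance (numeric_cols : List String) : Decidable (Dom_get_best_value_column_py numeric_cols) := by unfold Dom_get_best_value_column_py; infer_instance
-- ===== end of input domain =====

-- B replaces A's pattern-major nested loops + early return by a single pass over the
-- columns that computes each column's first-matching-pattern rank and keeps an argmin
-- (strict '<', so ties keep the earlier column): objective 'alternative'.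

-- ===== PORT A =====
-- inner loop: 'for col in numeric_cols: if pattern.lower() in col.lower(): return col'
def pvFindColA (pattern : String) : List String → Option String
  | [] => none
  | col :: rest =>
    if PySem.Str.isIn (PySem.Str.lower pattern) (PySem.Str.lower col) then some col
    else pvFindColA pattern rest

-- outer loop: 'for pattern in priority_patterns: …'
def pvLoopA (numeric_cols : List String) : List String → Option String
  | [] => none
  | p :: ps =>
    match pvFindColA p numeric_cols with
    | some c => some c
    | none => pvLoopA numeric_cols ps

def get_best_value_column_py (numeric_cols : List String) : Option String :=
  match numeric_cols with
  | [] => none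
  | _ =>
    match pvLoopA numeric_cols
        ["total", "amount", "revenue", "sales", "value", "sum", "count", "quantity"] with
    | some c => some c
    | none => PySem.List.pyGet? numeric_cols 0

-- ===== PORT B =====
-- inner loop of B: index of the first pattern contained in 'low', default dflt (= len(patterns))
def pvRankB (low : String) : List String → Nat → Nat → Nat
  | [], _, dflt => dflt
  | p :: ps, i, dflt => if PySem.Str.isIn p low then i else pvRankB low ps (i + 1) dflt

-- B's loop body: keep the column with the strictly smallest rank
def pvStepB (ps : List String) (acc : Option String × Nat) (col : String) : Option String × Nat :=
  let r := pvRankB (PySem.Str.lower col) ps 0 ps.length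
  if r < acc.2 then (some col, r) else acc

def get_best_value_column_py_alt (numeric_cols : List String) : Option String :=
  if numeric_cols = [] then none
  else
    let best := (numeric_cols.foldl
        (pvStepB ["total", "amount", "revenue", "sales", "value", "sum", "count", "quantity"])
        (none, (["total", "amount", "revenue", "sales", "value", "sum", "count", "quantity"] : List String).length)).1
    if best ≠ none then best else PySem.List.pyGet? numeric_cols 0

-- ===== PRECONDITION & SPEC =====
def Spec_get_best_value_column_py (numeric_cols : List String) (out : Option String) : Prop := out = get_best_value_column_py_alt numeric_cols
instance (numeric_cols : List String) (out : Option String) : Decidable (Spec_get_best_value_column_py numeric_cols out) := by unfold Spec_get_best_value_column_py; infer_instance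

-- ===== CLAIM (what is proved, stated in full; the proofs are below) =====
def Claim_equal_get_best_value_column_py : Prop := ∀ (numeric_cols : List String), Dom_get_best_value_column_py numeric_cols → Spec_get_best_value_column_py numeric_cols (get_best_value_column_py numeric_cols)

-- ===== LEMMAS AND PROOFS =====

-- proof-side name for the pattern list both ports inline
def pvPatterns : List String :=
  ["total", "amount", "revenue", "sales", "value", "sum", "count", "quantity"]

-- rank of a column w.r.t. a pattern list under a containment test
def pvRank (test : String → String → Bool) (ps : List String) (c : String) : Nat :=
  ps.findIdx (fun p => test p c)

-- running minimum of the ranks, seeded with init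
def pvMinR (r : String → Nat) (init : Nat) (cols : List String) : Nat :=
  (cols.map r).foldr min init

def pvTestA (p c : String) : Bool := PySem.Str.isIn (PySem.Str.lower p) (PySem.Str.lower c)
def pvTestB (p c : String) : Bool := PySem.Str.isIn p (PySem.Str.lower c)

-- generic form of A's outer loop
def pvLoopG (test : String → String → Bool) (cols : List String) : List String → Option String
  | [] => none
  | p :: ps =>
    match cols.find? (fun c => test p c) with
    | some c => some c
    | none => pvLoopG test cols ps

-- generic form of B's loop body
def pvStepG (r : String → Nat) (acc : Option String × Nat) (col : String) : Option String × Nat :=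
  if r col < acc.2 then (some col, r col) else acc

theorem pvFind?_congr_mem {α : Type} {p q : α → Bool} :
    ∀ (l : List α), (∀ x ∈ l, p x = q x) → l.find? p = l.find? q := by
  intro l
  induction l with
  | nil => intro _; rfl
  | cons a t ih =>
    intro h
    simp only [List.find?]
    rw [h a (by simp)]
    cases hq : q a with
    | true => rfl
    | false => exact ih (fun x hx => h x (by simp [hx]))

theorem pvFindIdx_congr_mem {α : Type} {p q : α → Bool} :
    ∀ (l : List α), (∀ x ∈ l, p x = q x) → l.findIdx p = l.findIdx q := by
  intro l
  induction l with
  | nil => intro _; rfl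
  | cons a t ih =>
    intro h
    simp only [List.findIdx_cons]
    rw [h a (by simp)]
    cases q a
    · simp [ih (fun x hx => h x (by simp [hx]))]
    · simp

theorem pvMinR_succ (r : String → Nat) (init : Nat) (cols : List String) :
    pvMinR (fun c => r c + 1) (init + 1) cols = pvMinR r init cols + 1 := by
  induction cols with
  | nil => rfl
  | cons c t ih =>
    simp only [pvMinR, List.map, List.foldr] at *
    rw [ih]
    omega

theorem pvMinR_le (r : String → Nat) (init : Nat) (cols : List String) :
    pvMinR r init cols ≤ init ∧ ∀ c ∈ cols, pvMinR r init cols ≤ r c := by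
  induction cols with
  | nil => exact ⟨le_refl _, by simp⟩
  | cons c t ih =>
    have h1 : pvMinR r init (c :: t) = min (r c) (pvMinR r init t) := rfl
    refine ⟨?_, ?_⟩
    · rw [h1]; exact le_trans (min_le_right _ _) ih.1
    · intro x hx
      rw [h1]
      rcases List.mem_cons.mp hx with h | h
      · subst h; exact min_le_left _ _
      · exact le_trans (min_le_right _ _) (ih.2 x h)

theorem pvMinR_zero_of_mem (r : String → Nat) (init : Nat) (cols : List String)
    (c : String) (hc : c ∈ cols) (h0 : r c = 0) : pvMinR r init cols = 0 :=
  Nat.le_zero.mp (h0 ▸ (pvMinR_le r init cols).2 c hc)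

-- a smaller seed absorbs the larger one
theorem pvMinR_seed_le (r : String → Nat) (t : List String) (a b : Nat) (hab : a ≤ b) :
    min a (pvMinR r b t) = pvMinR r a t := by
  induction t with
  | nil => simp only [pvMinR, List.map, List.foldr]; omega
  | cons d u ih =>
    simp only [pvMinR, List.map, List.foldr] at *
    omega

-- A's pattern-major search returns the first column whose rank attains the minimum (when any pattern matches)
theorem pvLoopG_char (test : String → String → Bool) :
    ∀ (ps cols : List String),
      pvLoopG test cols ps =
        cols.find? (fun c => decide (pvRank test ps c = pvMinR (pvRank test ps) ps.length cols ∧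
                                     pvMinR (pvRank test ps) ps.length cols < ps.length)) := by
  intro ps
  induction ps with
  | nil =>
    intro cols
    simp only [pvLoopG, List.length_nil]
    have h : cols.find? (fun c => decide (pvRank test [] c = pvMinR (pvRank test []) 0 cols ∧
        pvMinR (pvRank test []) 0 cols < 0)) = none := by
      rw [List.find?_eq_none]; intro x _; simp
    exact h.symm
  | cons p ps ih =>
    intro cols
    cases hf : cols.find? (fun c => test p c) with
    | some c0 =>
      have hc0 : c0 ∈ cols := List.mem_of_find?_eq_some hf
      have htc0 : test p c0 = true := by
        have := List.find?_some hf; simpa using this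
      have hr0 : pvRank test (p :: ps) c0 = 0 := by
        simp [pvRank, List.findIdx_cons, htc0]
      have hM : pvMinR (pvRank test (p :: ps)) (p :: ps).length cols = 0 :=
        pvMinR_zero_of_mem _ _ _ c0 hc0 hr0
      simp only [pvLoopG, hf, hM]
      rw [← hf]
      apply pvFind?_congr_mem
      intro x _
      by_cases hx : test p x = true
      · simp [hx, pvRank, List.findIdx_cons]
      · have hx' : test p x = false := by simpa using hx
        simp [hx', pvRank, List.findIdx_cons]
    | none =>
      have hnone : ∀ x ∈ cols, test p x = false := by
        intro x hx
        have := List.find?_eq_none.mp hf x hx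
        simpa using this
      simp only [pvLoopG, hf]
      rw [ih cols]
      have hrank : ∀ x ∈ cols, pvRank test (p :: ps) x = pvRank test ps x + 1 := by
        intro x hx
        simp [pvRank, List.findIdx_cons, hnone x hx]
      have hMeq : pvMinR (pvRank test (p :: ps)) (p :: ps).length cols =
          pvMinR (pvRank test ps) ps.length cols + 1 := by
        have h1 : pvMinR (pvRank test (p :: ps)) (p :: ps).length cols =
            pvMinR (fun c => pvRank test ps c + 1) (ps.length + 1) cols := by
          unfold pvMinR
          congr 1
          exact List.map_congr_left hrank
        rw [h1, pvMinR_succ]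
      rw [hMeq]
      apply pvFind?_congr_mem
      intro x hx
      rw [hrank x hx]
      simp only [List.length_cons]
      by_cases h : pvRank test ps x = pvMinR (pvRank test ps) ps.length cols ∧
          pvMinR (pvRank test ps) ps.length cols < ps.length
      · rw [decide_eq_true h, decide_eq_true (show _ ∧ _ from ⟨by omega, by omega⟩)]
      · rw [decide_eq_false h, decide_eq_false (by omega)]

-- B's strict-argmin fold characterised
theorem pvFoldG_char (r : String → Nat) :
    ∀ (cols : List String) (b0 : Option String) (r0 : Nat),
      cols.foldl (pvStepG r) (b0, r0) =
        if pvMinR r r0 cols < r0 then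
          (cols.find? (fun c => decide (r c = pvMinR r r0 cols)), pvMinR r r0 cols)
        else (b0, r0) := by
  intro cols
  induction cols with
  | nil =>
    intro b0 r0
    simp only [List.foldl, pvMinR, List.map, List.foldr]
    rw [if_neg (lt_irrefl r0)]
  | cons c t ih =>
    intro b0 r0
    have hM : pvMinR r r0 (c :: t) = min (r c) (pvMinR r r0 t) := rfl
    simp only [List.foldl, pvStepG]
    by_cases hrc : r c < r0
    · rw [if_pos hrc, ih (some c) (r c)]
      have hEq : pvMinR r r0 (c :: t) = pvMinR r (r c) t := by
        rw [hM, pvMinR_seed_le r t (r c) r0 (le_of_lt hrc)]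
      by_cases hlt : pvMinR r (r c) t < r c
      · rw [if_pos hlt, hEq, if_pos (show pvMinR r (r c) t < r0 by omega)]
        rw [List.find?_cons_of_neg (by simp only [decide_eq_true_eq]; omega)]
      · rw [if_neg hlt, hEq]
        have hMe : pvMinR r (r c) t = r c :=
          le_antisymm (pvMinR_le r (r c) t).1 (by omega)
        rw [hMe, if_pos hrc, List.find?_cons_of_pos (by simp)]
    · rw [if_neg hrc, ih b0 r0]
      by_cases hlt : pvMinR r r0 t < r0
      · have hEq : pvMinR r r0 (c :: t) = pvMinR r r0 t := by rw [hM]; omega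
        rw [if_pos hlt, hEq, if_pos hlt]
        rw [List.find?_cons_of_neg (by simp only [decide_eq_true_eq]; omega)]
      · rw [if_neg hlt, if_neg (show ¬ pvMinR r r0 (c :: t) < r0 by rw [hM]; omega)]

-- A's hand-written inner loop is find?
theorem pvFindColA_eq (p : String) :
    ∀ cols, pvFindColA p cols = cols.find? (fun c => pvTestA p c) := by
  intro cols
  induction cols with
  | nil => rfl
  | cons c t ih =>
    simp only [pvFindColA]
    cases h : PySem.Str.isIn (PySem.Str.lower p) (PySem.Str.lower c) with
    | true =>
      rw [if_pos rfl, List.find?_cons_of_pos (show pvTestA p c = true from h)]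
    | false =>
      rw [if_neg (by simp), List.find?_cons_of_neg (by simp only [pvTestA, h]; exact Bool.false_ne_true), ih]

theorem pvLoopA_eq (cols : List String) : ∀ ps, pvLoopA cols ps = pvLoopG pvTestA cols ps := by
  intro ps
  induction ps with
  | nil => rfl
  | cons p ps ih =>
    simp only [pvLoopA, pvLoopG, pvFindColA_eq, ih]

-- B's hand-written rank loop is findIdx over the patterns
theorem pvRankB_aux (low : String) (dflt : Nat) : ∀ (ps : List String) (i : Nat),
    pvRankB low ps i dflt = if ps.findIdx (fun p => PySem.Str.isIn p low) < ps.length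
      then i + ps.findIdx (fun p => PySem.Str.isIn p low) else dflt := by
  intro ps
  induction ps with
  | nil => intro i; simp [pvRankB]
  | cons p ps ih =>
    intro i
    simp only [pvRankB, List.findIdx_cons, List.length_cons]
    cases h : PySem.Str.isIn p low with
    | true => simp
    | false =>
      simp only [Bool.false_eq_true, if_false, cond_false]
      rw [ih (i + 1)]
      by_cases hlt : ps.findIdx (fun p => PySem.Str.isIn p low) < ps.length
      · rw [if_pos hlt,
          if_pos (show ps.findIdx (fun p => PySem.Str.isIn p low) + 1 < ps.length + 1 by omega)]
        omega
      · rw [if_neg hlt,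
          if_neg (show ¬ ps.findIdx (fun p => PySem.Str.isIn p low) + 1 < ps.length + 1 by omega)]

theorem pvRankB_eq (ps : List String) (c : String) :
    pvRankB (PySem.Str.lower c) ps 0 ps.length = pvRank pvTestB ps c := by
  rw [pvRankB_aux]
  have hle : ps.findIdx (fun p => PySem.Str.isIn p (PySem.Str.lower c)) ≤ ps.length :=
    List.findIdx_le_length
  by_cases h : ps.findIdx (fun p => PySem.Str.isIn p (PySem.Str.lower c)) < ps.length
  · rw [if_pos h]; simp [pvRank, pvTestB]
  · rw [if_neg h]
    simp only [pvRank, pvTestB]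
    omega

-- the eight concrete patterns are already lowercase, so A's test equals B's test on them
theorem pvTest_align (c : String) : ∀ p ∈ pvPatterns, pvTestA p c = pvTestB p c := by
  have hlow : ∀ p ∈ pvPatterns, PySem.Str.lower p = p := by decide
  intro p hp
  simp only [pvTestA, pvTestB, hlow p hp]

theorem pvRank_align (c : String) : pvRank pvTestA pvPatterns c = pvRank pvTestB pvPatterns c := by
  unfold pvRank
  exact pvFindIdx_congr_mem pvPatterns (fun p hp => pvTest_align c p hp)

theorem pvStepB_eq (ps : List String) : pvStepB ps = pvStepG (fun c => pvRank pvTestB ps c) := by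
  funext acc col
  simp only [pvStepB, pvStepG, pvRankB_eq]

-- ===== VERDICT (by name: the statement is the Claim_ definition above) =====
set_option maxHeartbeats 1000000 in
theorem get_best_value_column_py_spec : Claim_equal_get_best_value_column_py := by
  intro cols _
  unfold Spec_get_best_value_column_py
  cases cols with
  | nil => rfl
  | cons c t =>
    show (match pvLoopA (c :: t) pvPatterns with
          | some c0 => some c0
          | none => PySem.List.pyGet? (c :: t) 0) =
         (if (c :: t) = ([] : List String) then none
          else
            let best := ((c :: t).foldl (pvStepB pvPatterns) (none, pvPatterns.length)).1
            if best ≠ none then best else PySem.List.pyGet? (c :: t) 0)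
    rw [if_neg (show ¬ (c :: t) = ([] : List String) by simp)]
    simp only []
    rw [pvStepB_eq, pvFoldG_char, pvLoopA_eq, pvLoopG_char]
    have hrank : ∀ x, pvRank pvTestA pvPatterns x = pvRank pvTestB pvPatterns x :=
      fun x => pvRank_align x
    have hMeq : pvMinR (pvRank pvTestA pvPatterns) pvPatterns.length (c :: t) =
        pvMinR (fun x => pvRank pvTestB pvPatterns x) pvPatterns.length (c :: t) := by
      unfold pvMinR
      have hmap : List.map (pvRank pvTestA pvPatterns) (c :: t) =
          List.map (fun x => pvRank pvTestB pvPatterns x) (c :: t) :=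
        List.map_congr_left (fun x _ => hrank x)
      rw [hmap]
    by_cases hM : pvMinR (fun x => pvRank pvTestB pvPatterns x) pvPatterns.length (c :: t) <
        pvPatterns.length
    · rw [if_pos hM]
      have hfind : (c :: t).find? (fun x => decide (pvRank pvTestA pvPatterns x =
            pvMinR (pvRank pvTestA pvPatterns) pvPatterns.length (c :: t) ∧
            pvMinR (pvRank pvTestA pvPatterns) pvPatterns.length (c :: t) < pvPatterns.length)) =
          (c :: t).find? (fun x => decide ((fun y => pvRank pvTestB pvPatterns y) x =
            pvMinR (fun y => pvRank pvTestB pvPatterns y) pvPatterns.length (c :: t))) := by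
        apply pvFind?_congr_mem
        intro x _
        rw [hrank x, hMeq]
        by_cases h : pvRank pvTestB pvPatterns x =
            pvMinR (fun y => pvRank pvTestB pvPatterns y) pvPatterns.length (c :: t)
        · rw [decide_eq_true (show _ ∧ _ from ⟨h, hM⟩), decide_eq_true h]
        · rw [decide_eq_false (fun hc => h hc.1), decide_eq_false h]
      rw [hfind]
      cases hF : (c :: t).find? (fun x => decide ((fun y => pvRank pvTestB pvPatterns y) x =
          pvMinR (fun y => pvRank pvTestB pvPatterns y) pvPatterns.length (c :: t))) with
      | some c0 => simp
      | none => simp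
    · rw [if_neg hM]
      have hfind : (c :: t).find? (fun x => decide (pvRank pvTestA pvPatterns x =
            pvMinR (pvRank pvTestA pvPatterns) pvPatterns.length (c :: t) ∧
            pvMinR (pvRank pvTestA pvPatterns) pvPatterns.length (c :: t) < pvPatterns.length)) =
          none := by
        rw [List.find?_eq_none]
        intro x _
        rw [hrank x, hMeq]
        simp only [decide_eq_true_eq]
        exact fun hc => hM hc.2
      rw [hfind]
      simp
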